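-- pv_equiv track=rewrite | github.com/ktikku/100-days-of-code-2024 | 476. Number Complement.py | calculate_dec
-- ===== SOURCE A (Python) =====
-- def calculate_dec(res):
--     number = 0
--     for i in range(len(res)):
--         if res[i] == 1:
--             multiplier = 0
--         else:
--             multiplier = 1
--         number += multiplier * pow(2, i)
--     return number
-- ===== SOURCE B (Python) =====
-- def calculate_dec(res):
--     s = ''.join('0' if x == 1 else '1' for x in reversed(res))
--     return int(s, 2) if s else 0
-- ===== Notes on version B (the rewrite author's own statement) =====
-- stated objective: idiomatic
-- what changed: Instead of summing multiplier*pow(2,i) per index, B builds the complemented bit string MSB-first (over reversed(res)) and delegates the weighting to base-2 parsing with int(s, 2), guarding the empty string with a plain 0.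
import Mathlib
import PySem

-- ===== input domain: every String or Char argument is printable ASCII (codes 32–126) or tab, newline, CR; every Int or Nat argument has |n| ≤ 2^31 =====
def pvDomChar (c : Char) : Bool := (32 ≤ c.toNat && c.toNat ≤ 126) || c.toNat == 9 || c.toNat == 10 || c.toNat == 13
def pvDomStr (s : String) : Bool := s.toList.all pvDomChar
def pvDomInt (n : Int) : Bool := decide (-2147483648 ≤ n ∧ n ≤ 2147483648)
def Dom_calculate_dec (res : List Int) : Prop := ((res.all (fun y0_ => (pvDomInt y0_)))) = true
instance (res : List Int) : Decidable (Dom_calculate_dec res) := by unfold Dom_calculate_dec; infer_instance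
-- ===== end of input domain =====

-- B builds the complemented bit string MSB-first and parses it with int(s, 2) instead of summing multiplier*pow(2,i); objective: idiomatic.

-- ===== PORT A =====
-- for i in range(len(res)): number += (0 if res[i]==1 else 1) * pow(2, i)
-- pow(2, i) for i ≥ 0 (every i drawn from range) is exactly 2 ^ i.toNat
def calculate_dec (res : List Int) : Int :=
  (PySem.List.pyRange 0 (res.length : Int) 1).foldl
    (fun number i =>
      number + (if PySem.List.pyGetD res i 0 == 1 then 0 else 1) * 2 ^ i.toNat) 0

-- ===== PORT B =====
-- s = ''.join('0' if x == 1 else '1' for x in reversed(res))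
def pvBits (res : List Int) : List Char :=
  res.reverse.map (fun x => if x == 1 then '0' else '1')

-- int(s, 2): hand port, exact on strings of '0'/'1' characters (all pvBits produces)
def pvParse2 (s : List Char) : Int :=
  s.foldl (fun acc c => 2 * acc + (if c == '1' then 1 else 0)) 0

def calculate_dec_alt (res : List Int) : Int :=
  let s := pvBits res
  if s ≠ [] then pvParse2 s else 0

-- ===== PRECONDITION & SPEC =====
def Spec_calculate_dec (res : List Int) (out : Int) : Prop := out = calculate_dec_alt res
instance (res : List Int) (out : Int) : Decidable (Spec_calculate_dec res out) := by unfold Spec_calculate_dec; infer_instance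

-- ===== CLAIM (what is proved, stated in full; the proofs are below) =====
def Claim_equal_calculate_dec : Prop := ∀ (res : List Int), Dom_calculate_dec res → Spec_calculate_dec res (calculate_dec res)

-- ===== LEMMAS AND PROOFS =====

-- reference value: LSB-first weighted sum, structurally recursive
def pvS : List Int → Int
  | [] => 0
  | x :: xs => (if x == 1 then 0 else 1) + 2 * pvS xs

lemma pvSum_eq_S (res : List Int) :
    ((List.range res.length).map
      (fun k => (if res.getD k 0 == 1 then (0 : Int) else 1) * 2 ^ k)).sum = pvS res := by
  induction res with
  | nil => simp [pvS]
  | cons x xs ih =>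
    rw [List.length_cons, List.range_succ_eq_map]
    simp only [List.map_cons, List.map_map, List.sum_cons, List.getD_cons_zero, pow_zero, mul_one]
    have hmap : (fun k => (if (x :: xs).getD k 0 == 1 then (0 : Int) else 1) * 2 ^ k) ∘ Nat.succ
        = fun k => 2 * ((if xs.getD k 0 == 1 then (0 : Int) else 1) * 2 ^ k) := by
      funext k
      simp only [Function.comp_apply, List.getD_cons_succ, pow_succ]
      ring
    rw [hmap, List.sum_map_mul_left, ih, pvS]

lemma pvA_eq_S (res : List Int) : calculate_dec res = pvS res := by
  unfold calculate_dec
  rw [PySem.List.pyRange_one, List.foldl_map, PySem.List.foldl_add]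
  simp only [zero_add, Int.sub_zero, Int.toNat_natCast, PySem.List.pyGetD_natCast]
  exact pvSum_eq_S res

lemma pvB_eq_S (res : List Int) : calculate_dec_alt res = pvS res := by
  have key : ∀ res : List Int, pvParse2 (pvBits res) = pvS res := by
    intro res
    induction res with
    | nil => rfl
    | cons x xs ih =>
      unfold pvBits pvParse2 at ih ⊢
      simp only [List.reverse_cons, List.map_append, List.map_cons, List.map_nil,
        List.foldl_append, List.foldl_cons, List.foldl_nil]
      rw [ih, pvS]
      by_cases h : x == 1 <;> simp [h] <;> ring
  cases res with
  | nil => rfl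
  | cons x xs =>
    unfold calculate_dec_alt
    simp only [pvBits, List.reverse_cons, List.map_append, List.map_cons, List.map_nil,
      List.append_ne_nil_of_right_ne_nil, ne_eq, not_false_iff, if_pos]
    have := key (x :: xs)
    simpa [pvBits] using this

-- ===== VERDICT (by name: the statement is the Claim_ definition above) =====
theorem calculate_dec_spec : Claim_equal_calculate_dec := by
  intro res _
  unfold Spec_calculate_dec
  rw [pvA_eq_S, pvB_eq_S]
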